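-- pv_equiv track=rewrite | github.com/flo2406/Euler_project | project65.py | e_convergent
-- ===== SOURCE A (Python) =====
-- def e_seq(n):
--     res = []
--     for i in range(1, (n // 3) + 2):
--         res.append(1)
--         res.append(2 * i)
--         res.append(1)
--     return res[:n - 1]
--
-- def e_convergent(n):
--     if n <= 0:
--         return None
--
--     seq = e_seq(n)
--     seq_len = len(seq)
--     first_nb = 2
--
--     num = 0
--     den = 1
--
--     if seq_len != 0:
--         num = 1
--         den = seq[-1]
--         seq.pop()
--         for e in seq[::-1]:
--             next_num = den
--             next_den = num + e * den
--             num = next_num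
--             den = next_den
--
--     num += first_nb * den
--     return num, den
-- ===== SOURCE B (Python) =====
-- def e_convergent(n):
--     if n <= 0:
--         return None
--     # continued-fraction coefficients of e: [2; 1, 2, 1, 1, 4, 1, ...]
--     coeffs = [2] + [x for i in range(1, n // 3 + 2) for x in (1, 2 * i, 1)][:n - 1]
--     # forward convergent recurrence
--     h2, h1 = 0, 1
--     k2, k1 = 1, 0
--     for a in coeffs:
--         h2, h1 = h1, a * h1 + h2
--         k2, k1 = k1, a * k1 + k2
--     return h1, k1
-- ===== Notes on version B (the rewrite author's own statement) =====
-- stated objective: alternative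
-- what changed: B evaluates the continued fraction with the standard forward convergent recurrence (two sliding numerator/denominator pairs over [2]+coefficients), instead of A's backward fold that pops the last coefficient and iterates over the reversed list.
import Mathlib
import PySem

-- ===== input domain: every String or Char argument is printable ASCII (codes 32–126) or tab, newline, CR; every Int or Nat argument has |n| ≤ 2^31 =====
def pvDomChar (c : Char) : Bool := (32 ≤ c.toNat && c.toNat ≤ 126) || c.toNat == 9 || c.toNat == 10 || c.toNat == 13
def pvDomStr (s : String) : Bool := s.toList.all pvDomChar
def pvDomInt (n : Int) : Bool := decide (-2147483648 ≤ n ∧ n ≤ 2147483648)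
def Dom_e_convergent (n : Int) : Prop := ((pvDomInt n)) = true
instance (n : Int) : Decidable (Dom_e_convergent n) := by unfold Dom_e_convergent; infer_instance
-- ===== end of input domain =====

-- B evaluates the same continued-fraction coefficients with the forward convergent
-- recurrence (alternative decomposition) instead of A's pop/reverse backward fold.

-- ===== PORT A =====
-- e_seq: append 1, 2*i, 1 per i, then slice [:n-1]
def eSeqA (n : Int) : List Int :=
  PySem.List.slice
    ((PySem.List.pyRange 1 (PySem.Int.floordiv n 3 + 2) 1).foldl
      (fun res i => res ++ [1] ++ [2 * i] ++ [1]) [])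
    none (some (n - 1))

def e_convergent (n : Int) : Option (Int × Int) :=
  if n ≤ 0 then none
  else
    let seq := eSeqA n
    let seqLen := seq.length
    let firstNb : Int := 2
    let nd : Int × Int :=
      if seqLen ≠ 0 then
        -- num = 1; den = seq[-1] (guarded nonempty, so pyGet? is some); seq.pop() = dropLast;
        -- seq[::-1] = reverse (PySem.List.slice?_none_none_neg_one)
        (seq.dropLast.reverse).foldl
          (fun (nd : Int × Int) e => (nd.2, nd.1 + e * nd.2))
          (1, (PySem.List.pyGet? seq (-1)).getD 0)
      else (0, 1)
    some (nd.1 + firstNb * nd.2, nd.2)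

-- ===== PORT B =====
-- coeffs = [2] + [x for i in range(1, n//3+2) for x in (1, 2*i, 1)][:n-1]
def coeffsB (n : Int) : List Int :=
  [2] ++ PySem.List.slice
    ((PySem.List.pyRange 1 (PySem.Int.floordiv n 3 + 2) 1).flatMap
      (fun i => [1, 2 * i, 1]))
    none (some (n - 1))

def e_convergent_alt (n : Int) : Option (Int × Int) :=
  if n ≤ 0 then none
  else
    let st := (coeffsB n).foldl
      (fun (s : Int × Int × Int × Int) a =>
        (s.2.1, a * s.2.1 + s.1, s.2.2.2, a * s.2.2.2 + s.2.2.1))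
      (0, 1, 1, 0)
    some (st.2.1, st.2.2.2)

-- ===== PRECONDITION & SPEC =====
def Spec_e_convergent (n : Int) (out : Option (Int × Int)) : Prop := out = e_convergent_alt n
instance (n : Int) (out : Option (Int × Int)) : Decidable (Spec_e_convergent n out) := by unfold Spec_e_convergent; infer_instance

-- ===== CLAIM (what is proved, stated in full; the proofs are below) =====
def Claim_equal_e_convergent : Prop := ∀ (n : Int), Dom_e_convergent n → Spec_e_convergent n (e_convergent n)

-- ===== LEMMAS AND PROOFS =====

-- value of A's backward fold, as a structural recursion from the front
def bwd : List Int → Int × Int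
  | [] => (0, 1)
  | a :: t => ((bwd t).2, (bwd t).1 + a * (bwd t).2)

-- A's fold (init (1, last), over reversed dropLast) computes bwd
theorem bwd_foldl (l : List Int) (h : l ≠ []) :
    (l.dropLast.reverse).foldl (fun (nd : Int × Int) e => (nd.2, nd.1 + e * nd.2))
      (1, (PySem.List.pyGet? l (-1)).getD 0) = bwd l := by
  induction l with
  | nil => simp at h
  | cons a t ih =>
    cases t with
    | nil => simp [PySem.List.pyGet?_neg_one, bwd]
    | cons b t' =>
      have ht : (b :: t') ≠ [] := by simp
      have hlast : PySem.List.pyGet? (a :: b :: t') (-1) = PySem.List.pyGet? (b :: t') (-1) := by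
        simp [PySem.List.pyGet?_neg_one, List.getLast?_cons_cons]
      rw [hlast]
      have hdrop : (a :: b :: t').dropLast = a :: (b :: t').dropLast := by simp
      rw [hdrop, List.reverse_cons, List.foldl_append, ih ht]
      simp [bwd]

-- the forward recurrence in terms of bwd
theorem fwd_char (l : List Int) : ∀ (h2 h1 k2 k1 : Int),
    (l.foldl (fun (s : Int × Int × Int × Int) a =>
        (s.2.1, a * s.2.1 + s.1, s.2.2.2, a * s.2.2.2 + s.2.2.1)) (h2, h1, k2, k1)).2.1
      = h1 * (bwd l).2 + h2 * (bwd l).1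
  ∧ (l.foldl (fun (s : Int × Int × Int × Int) a =>
        (s.2.1, a * s.2.1 + s.1, s.2.2.2, a * s.2.2.2 + s.2.2.1)) (h2, h1, k2, k1)).2.2.2
      = k1 * (bwd l).2 + k2 * (bwd l).1 := by
  induction l with
  | nil => intro h2 h1 k2 k1; simp [bwd]
  | cons a t ih =>
    intro h2 h1 k2 k1
    simp only [List.foldl_cons]
    obtain ⟨ihh, ihk⟩ := ih h1 (a * h1 + h2) k1 (a * k1 + k2)
    refine ⟨?_, ?_⟩ <;> simp only [bwd, ihh, ihk] <;> ring

-- the two ports build the same coefficient tail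
theorem foldA_flatMap (l : List Int) (acc : List Int) :
    l.foldl (fun res i => res ++ [1] ++ [2 * i] ++ [1]) acc
      = acc ++ l.flatMap (fun i => [1, 2 * i, 1]) := by
  have : (fun (res : List Int) (i : Int) => res ++ [1] ++ [2 * i] ++ [1])
      = fun res i => res ++ [1, 2 * i, 1] := by
    funext res i; simp
  rw [this, PySem.List.foldl_append_eq_flatMap]

theorem seq_eq (n : Int) : coeffsB n = 2 :: eSeqA n := by
  unfold coeffsB eSeqA
  rw [foldA_flatMap]
  simp

theorem e_convergent_eq (n : Int) : e_convergent n = e_convergent_alt n := by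
  unfold e_convergent e_convergent_alt
  by_cases hn : n ≤ 0
  · simp [hn]
  · simp only [hn, if_false]
    rw [seq_eq]
    simp only [List.foldl_cons]
    obtain ⟨hh, hk⟩ := fwd_char (eSeqA n) 1 (2 * 1 + 0) 0 (2 * 0 + 1)
    rw [hh, hk]
    by_cases hs : eSeqA n = []
    · simp [hs, bwd]
    · have hlen : ¬((eSeqA n).length = 0) := by simp [hs]
      rw [if_pos hlen, bwd_foldl (eSeqA n) hs]
      simp only [Option.some.injEq, Prod.mk.injEq]
      constructor <;> ring

-- ===== VERDICT (by name: the statement is the Claim_ definition above) =====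
theorem e_convergent_spec : Claim_equal_e_convergent := by
  intro n _
  unfold Spec_e_convergent
  exact e_convergent_eq n
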